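-- pv_equiv track=rewrite | github.com/Angel-W10/LeetCode | RSP/1687_Delivering_Boxes_from_Storage_to_Ports.py | load_ship
-- ===== SOURCE A (Python) =====
-- def load_ship(boxes, maxb, maxw):
--     load = []
--     n, w, i = 0, 0, 0
--     while(boxes and n<maxb and w<maxw):
--         box = boxes.pop(0)
--         load.append(box)
--         n+=1
--         w+=box[1]
--         i+=1
--     return load, boxes
-- ===== SOURCE B (Python) =====
-- from itertools import accumulate, islice, takewhile
--
--
-- def load_ship(boxes, maxb, maxw):
--     # Lazily accumulate the weights of at most min(len, maxb) boxes and count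
--     # how many running weights stay below maxw; then split the list once.
--     limit = min(len(boxes), max(maxb, 0))
--     prefix = accumulate((box[1] for box in islice(boxes, limit)), initial=0)
--     m = sum(1 for _ in takewhile(lambda w: w < maxw, islice(prefix, limit)))
--     load = boxes[:m]
--     del boxes[:m]
--     return load, boxes
-- ===== Notes on version B (the rewrite author's own statement) =====
-- stated objective: alternative
-- what changed: Replaces the one-box-at-a-time pop(0) loop with a lazily consumed prefix-sum of the weights (itertools accumulate + takewhile counts the running sums below maxw) followed by one slice/del split of the list.
import Mathlib
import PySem

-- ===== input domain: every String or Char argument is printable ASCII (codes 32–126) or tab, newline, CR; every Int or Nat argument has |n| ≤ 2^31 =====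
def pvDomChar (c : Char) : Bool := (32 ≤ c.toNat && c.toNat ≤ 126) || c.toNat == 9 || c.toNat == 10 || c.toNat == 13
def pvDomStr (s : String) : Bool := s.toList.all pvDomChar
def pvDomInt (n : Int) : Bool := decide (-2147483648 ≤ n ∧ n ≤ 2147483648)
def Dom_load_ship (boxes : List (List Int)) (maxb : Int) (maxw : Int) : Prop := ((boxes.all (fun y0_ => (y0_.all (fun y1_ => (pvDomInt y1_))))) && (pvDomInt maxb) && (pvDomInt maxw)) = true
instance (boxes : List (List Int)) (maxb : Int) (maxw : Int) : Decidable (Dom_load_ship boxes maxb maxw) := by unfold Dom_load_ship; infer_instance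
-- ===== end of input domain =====

-- B replaces A's pop-one-box-at-a-time loop with a lazily consumed weight prefix sum (count the running sums below maxw) and one split of the list (alternative algorithm, same cost). Return-value equivalence; B performs the same in-place removal as A.
-- ===== PORT A =====
-- weight of a box: box[1]; Pre_ guarantees the index exists for every box the loop pops
def pvWt (box : List Int) : Int := (PySem.List.pyGet? box 1).getD 0

-- the while loop of A: state (n, w, load) carried through the remaining boxes
def pvLoopA : List (List Int) → Int → Int → Int → Int → List (List Int) → List (List Int) × List (List Int)
  | [], _, _, _, _, load => (load, [])
  | box :: rest, maxb, maxw, n, w, load =>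
    if n < maxb ∧ w < maxw then
      pvLoopA rest maxb maxw (n + 1) (w + pvWt box) (load ++ [box])
    else (load, box :: rest)

def load_ship (boxes : List (List Int)) (maxb : Int) (maxw : Int) : List (List Int) × List (List Int) :=
  pvLoopA boxes maxb maxw 0 0 []

-- ===== PORT B =====
def load_ship_alt (boxes : List (List Int)) (maxb : Int) (maxw : Int) : List (List Int) × List (List Int) :=
  let limit : Nat := min boxes.length (max maxb 0).toNat
  -- prefix = accumulate(weights of islice(boxes, limit), initial=0)
  let pref : List Int := (boxes.take limit).scanl (fun acc box => acc + pvWt box) 0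
  -- m = number of running weights (first `limit` of prefix) taken while < maxw
  let m : Nat := ((pref.take limit).takeWhile (fun w => decide (w < maxw))).length
  (boxes.take m, boxes.drop m)

-- ===== PRECONDITION & SPEC =====
-- Pre_ excludes exactly the inputs on which A raises IndexError: some box the loop pops
-- (box k with k < min(len, maxb) and every running weight up to k still below maxw) has
-- fewer than 2 entries. B raises only on a subset of these, never where A returns.
def Pre_load_ship (boxes : List (List Int)) (maxb : Int) (maxw : Int) : Prop :=
  ∀ k ∈ List.range (min boxes.length (max maxb 0).toNat),
    (∀ j ∈ List.range (k + 1), ((boxes.take j).map pvWt).sum < maxw) →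
    2 ≤ (boxes.getD k []).length
instance (boxes : List (List Int)) (maxb : Int) (maxw : Int) : Decidable (Pre_load_ship boxes maxb maxw) := by unfold Pre_load_ship; infer_instance

def pvWitness_load_ship : List (List Int) × Int × Int := ([[1, 2], [3, 4], [5, 1]], 2, 3)

def Spec_load_ship (boxes : List (List Int)) (maxb : Int) (maxw : Int) (out : List (List Int) × List (List Int)) : Prop := out = load_ship_alt boxes maxb maxw
instance (boxes : List (List Int)) (maxb : Int) (maxw : Int) (out : List (List Int) × List (List Int)) : Decidable (Spec_load_ship boxes maxb maxw out) := by unfold Spec_load_ship; infer_instance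

-- ===== CLAIM (what is proved, stated in full; the proofs are below) =====
def Claim_equal_load_ship : Prop := ∀ (boxes : List (List Int)) (maxb : Int) (maxw : Int), Dom_load_ship boxes maxb maxw → Pre_load_ship boxes maxb maxw → Spec_load_ship boxes maxb maxw (load_ship boxes maxb maxw)

-- ===== LEMMAS AND PROOFS =====
-- common spec: how many boxes the loop takes, phrased on the remaining budgets
def pvTakeCount : List (List Int) → Int → Int → Nat
  | [], _, _ => 0
  | box :: rest, maxb, maxw =>
    if 0 < maxb ∧ 0 < maxw then pvTakeCount rest (maxb - 1) (maxw - pvWt box) + 1 else 0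

theorem pvLoopA_eq : ∀ (boxes : List (List Int)) (maxb maxw n w : Int) (load : List (List Int)),
    pvLoopA boxes maxb maxw n w load =
      (load ++ boxes.take (pvTakeCount boxes (maxb - n) (maxw - w)),
       boxes.drop (pvTakeCount boxes (maxb - n) (maxw - w))) := by
  intro boxes
  induction boxes with
  | nil => intro maxb maxw n w load; simp [pvLoopA, pvTakeCount]
  | cons box rest ih =>
    intro maxb maxw n w load
    by_cases h : n < maxb ∧ w < maxw
    · have e1 : maxb - (n + 1) = (maxb - n) - 1 := by ring
      have e2 : maxw - (w + pvWt box) = (maxw - w) - pvWt box := by ring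
      simp only [pvLoopA, if_pos h, ih, pvTakeCount,
        if_pos (show 0 < maxb - n ∧ 0 < maxw - w by omega), e1, e2,
        List.take_succ_cons, List.drop_succ_cons, List.append_assoc, List.singleton_append]
    · simp only [pvLoopA, if_neg h, pvTakeCount,
        if_neg (show ¬(0 < maxb - n ∧ 0 < maxw - w) by omega),
        List.take_zero, List.drop_zero, List.append_nil]

theorem pvScanl_shift : ∀ (xs : List (List Int)) (c : Int),
    xs.scanl (fun acc box => acc + pvWt box) c =
      (xs.scanl (fun acc box => acc + pvWt box) 0).map (fun v => c + v) := by
  intro xs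
  induction xs with
  | nil => intro c; simp [List.scanl]
  | cons x xs ih =>
    intro c
    simp only [List.scanl_cons]
    rw [ih (c + pvWt x), ih (0 + pvWt x)]
    simp only [List.map_cons, List.map_map]
    have hc : ((fun v => c + v) ∘ (fun v => (0 + pvWt x) + v)) = (fun v => (c + pvWt x) + v) := by
      funext v; simp; ring
    rw [hc]
    simp

theorem pvAlt_m : ∀ (boxes : List (List Int)) (maxb maxw : Int),
    ((((boxes.take (min boxes.length (max maxb 0).toNat)).scanl (fun acc box => acc + pvWt box) 0).take
        (min boxes.length (max maxb 0).toNat)).takeWhile (fun w => decide (w < maxw))).length =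
      pvTakeCount boxes maxb maxw := by
  intro boxes
  induction boxes with
  | nil => intro maxb maxw; simp [pvTakeCount]
  | cons box rest ih =>
    intro maxb maxw
    by_cases hb : 0 < maxb
    · have hk : min (box :: rest).length (max maxb 0).toNat
          = (min rest.length (max (maxb - 1) 0).toNat) + 1 := by
        simp only [List.length_cons]; omega
      rw [hk, List.take_succ_cons, List.scanl_cons, List.take_succ_cons, List.takeWhile_cons]
      by_cases hw : 0 < maxw
      · have hp : (decide ((0 : Int) < maxw)) = true := by simpa using hw
        rw [show (decide ((0 : Int) < maxw)) = true from hp]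
        simp only [if_true]
        rw [zero_add, pvScanl_shift, ← List.map_take, List.takeWhile_map]
        have hfun : ((fun w => decide (w < maxw)) ∘ (fun v => pvWt box + v))
            = (fun v : Int => decide (v < maxw - pvWt box)) := by
          funext v; simp only [Function.comp]; rw [decide_eq_decide]; omega
        rw [hfun]
        simp only [List.length_cons, List.length_map]
        rw [ih (maxb - 1) (maxw - pvWt box)]
        simp [pvTakeCount, hb, hw]
      · have hp : (decide ((0 : Int) < maxw)) = false := by simpa using hw
        rw [show (decide ((0 : Int) < maxw)) = false from hp]
        simp [pvTakeCount, hw]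
    · have hk : min (box :: rest).length (max maxb 0).toNat = 0 := by
        simp only [List.length_cons]; omega
      rw [hk]
      simp [pvTakeCount, hb]

-- ===== VERDICT (by name: the statement is the Claim_ definition above) =====
theorem load_ship_spec : Claim_equal_load_ship := by
  intro boxes maxb maxw _ _
  unfold Spec_load_ship load_ship
  simp only [load_ship_alt]
  rw [pvLoopA_eq, pvAlt_m]
  simp
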